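-- pv_equiv track=rewrite | github.com/Aiden0609/CMSC6950_F2025_Project_yunyud | src/computeSDI.py | compute_spell_index
-- ===== SOURCE A (Python) =====
-- def compute_spell_index(condition):
--     """
--     condition: Boolean array, True where extreme event occurs.
--     Returns total length of all spells ≥6 days.
--     """
--     count = 0
--     current = 0
--
--     for v in condition:
--         if v:
--             current += 1
--         else:
--             if current >= 6:
--                 count += current
--             current = 0
--
--     if current >= 6:
--         count += current
--
--     return count
-- ===== SOURCE B (Python) =====
-- def compute_spell_index(condition):
--     """
--     condition: Boolean array, True where extreme event occurs.
--     Returns total length of all spells >=6 days.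
--     Decomposes the sequence into maximal True-run lengths first (nested loops
--     sharing one iterator), then sums the lengths >= 6 in one reduction.
--     """
--     runs = []
--     it = iter(condition)
--     for v in it:
--         if v:
--             n = 1
--             for w in it:
--                 if not w:
--                     break
--                 n += 1
--             runs.append(n)
--     return sum(L for L in runs if L >= 6)
-- ===== Notes on version B (the rewrite author's own statement) =====
-- stated objective: alternative
-- what changed: B first decomposes the sequence into the list of maximal True-run lengths (recursive grouping), then sums the lengths >= 6 in one reduction, replacing A's running counter with its duplicated post-loop tail case.
import Mathlib
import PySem

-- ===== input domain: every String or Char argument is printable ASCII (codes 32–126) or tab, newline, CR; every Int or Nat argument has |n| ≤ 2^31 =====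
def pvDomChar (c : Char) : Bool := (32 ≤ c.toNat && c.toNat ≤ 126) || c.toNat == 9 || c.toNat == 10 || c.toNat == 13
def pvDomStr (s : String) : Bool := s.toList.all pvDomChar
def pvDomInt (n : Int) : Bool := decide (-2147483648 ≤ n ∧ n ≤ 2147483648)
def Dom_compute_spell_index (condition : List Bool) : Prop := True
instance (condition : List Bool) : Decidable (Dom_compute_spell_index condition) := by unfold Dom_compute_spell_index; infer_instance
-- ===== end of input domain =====

-- B replaces A's running counter (with its duplicated post-loop tail case) by first
-- building the list of maximal True-run lengths and then summing those ≥ 6 (objective: alternative).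

-- ===== PORT A =====
-- A's for-loop over `condition` with state (count, current)
def pvLoopA : List Bool → Int × Int → Int × Int
  | [], st => st
  | v :: rest, (count, current) =>
    if v then pvLoopA rest (count, current + 1)
    else pvLoopA rest ((if current ≥ 6 then count + current else count), 0)

def compute_spell_index (condition : List Bool) : Int :=
  let st := pvLoopA condition (0, 0)
  if st.2 ≥ 6 then st.1 + st.2 else st.1

-- ===== PORT B =====
-- inner `for w in it` loop: consumes the leading Trues, returns the run length so far
-- and the remainder of the iterator (the break consumes the breaking element, as in Python)
def pvInnerB : List Bool → Nat → Nat × List Bool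
  | [], n => (n, [])
  | w :: rest, n => if !w then (n, rest) else pvInnerB rest (n + 1)

theorem pvInnerB_snd_le : ∀ (xs : List Bool) (n : Nat), (pvInnerB xs n).2.length ≤ xs.length := by
  intro xs
  induction xs with
  | nil => intro n; simp [pvInnerB]
  | cons w rest ih =>
    intro n
    simp only [pvInnerB]
    split
    · simp
    · exact le_trans (ih (n + 1)) (by simp)

-- outer `for v in it` loop, accumulating the list of run lengths
def pvOuterB : List Bool → List Nat → List Nat
  | [], runs => runs
  | v :: rest, runs =>
    if v then
      let p := pvInnerB rest 1
      pvOuterB p.2 (runs ++ [p.1])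
    else pvOuterB rest runs
termination_by xs _ => xs.length
decreasing_by
  · exact Nat.lt_succ_of_le (pvInnerB_snd_le rest 1)
  · simp

def compute_spell_index_alt (condition : List Bool) : Int :=
  ((pvOuterB condition []).filter (fun L => decide (L ≥ 6))).foldl (fun (acc : Int) (L : Nat) => acc + (L : Int)) 0

-- ===== PRECONDITION & SPEC =====
def Spec_compute_spell_index (condition : List Bool) (out : Int) : Prop := out = compute_spell_index_alt condition
instance (condition : List Bool) (out : Int) : Decidable (Spec_compute_spell_index condition out) := by unfold Spec_compute_spell_index; infer_instance

-- ===== CLAIM (what is proved, stated in full; the proofs are below) =====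
def Claim_equal_compute_spell_index : Prop := ∀ (condition : List Bool), Dom_compute_spell_index condition → Spec_compute_spell_index condition (compute_spell_index condition)

-- ===== LEMMAS AND PROOFS =====

-- the sum B computes, as a function of a run-length list
def pvSumBig (l : List Nat) : Int :=
  (l.filter (fun L => decide (L ≥ 6))).foldl (fun (acc : Int) (L : Nat) => acc + (L : Int)) 0

theorem pvFoldl_cast_sum : ∀ (l : List Nat) (i : Int),
    l.foldl (fun (acc : Int) (L : Nat) => acc + (L : Int)) i = i + (l.map (fun (L : Nat) => (L : Int))).sum := by
  intro l
  induction l with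
  | nil => intro i; simp
  | cons x xs ih =>
    intro i
    rw [List.foldl_cons, List.map_cons, List.sum_cons, ih]
    ring

theorem pvSumBig_nil : pvSumBig [] = 0 := rfl

theorem pvSumBig_cons (c : Nat) (l : List Nat) :
    pvSumBig (c :: l) = (if c ≥ 6 then (c : Int) else 0) + pvSumBig l := by
  unfold pvSumBig
  rw [List.filter_cons]
  by_cases h : c ≥ 6
  · rw [if_pos (show decide (c ≥ 6) = true by simpa using h), if_pos h,
      List.foldl_cons, pvFoldl_cast_sum, pvFoldl_cast_sum]
    ring
  · rw [if_neg (show ¬ decide (c ≥ 6) = true by simpa using h), if_neg h]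
    ring

-- accumulator lemma for the outer loop
theorem pvOuterB_acc_aux (n : Nat) : ∀ (xs : List Bool), xs.length ≤ n →
    ∀ (acc : List Nat), pvOuterB xs acc = acc ++ pvOuterB xs [] := by
  induction n with
  | zero =>
    intro xs h acc
    have hx : xs = [] := List.eq_nil_of_length_eq_zero (Nat.le_zero.mp h)
    subst hx; simp [pvOuterB]
  | succ n ih =>
    intro xs h acc
    cases xs with
    | nil => simp [pvOuterB]
    | cons v rest =>
      cases v with
      | true =>
        simp only [pvOuterB, if_pos]
        have hlen : (pvInnerB rest 1).2.length ≤ n :=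
          le_trans (pvInnerB_snd_le rest 1) (by simpa using Nat.succ_le_succ_iff.mp h)
        rw [ih _ hlen (acc ++ [(pvInnerB rest 1).1]), ih _ hlen ([] ++ [(pvInnerB rest 1).1])]
        simp
      | false =>
        simp only [pvOuterB, Bool.false_eq_true, if_false]
        exact ih rest (by simpa using Nat.succ_le_succ_iff.mp h) acc

theorem pvOuterB_acc (xs : List Bool) (acc : List Nat) :
    pvOuterB xs acc = acc ++ pvOuterB xs [] :=
  pvOuterB_acc_aux xs.length xs le_rfl acc

-- the inner loop eats a block of Trues
theorem pvInnerB_replicate : ∀ (k : Nat) (xs : List Bool) (n : Nat),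
    pvInnerB (List.replicate k true ++ xs) n = pvInnerB xs (n + k) := by
  intro k
  induction k with
  | zero => intro xs n; simp
  | succ k ih =>
    intro xs n
    simp only [List.replicate_succ, List.cons_append, pvInnerB, Bool.not_true, Bool.false_eq_true,
      if_false]
    rw [ih xs (n + 1)]
    congr 1
    omega

theorem pvOuterB_true_block (k : Nat) (xs : List Bool) :
    pvOuterB (List.replicate (k + 1) true ++ false :: xs) [] = (k + 1) :: pvOuterB xs [] := by
  simp only [List.replicate_succ, List.cons_append, pvOuterB, if_pos]
  rw [pvInnerB_replicate k (false :: xs) 1]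
  simp only [pvInnerB, Bool.not_false, if_pos]
  rw [pvOuterB_acc]
  simp [Nat.add_comm]

theorem pvOuterB_true_block_nil (k : Nat) :
    pvOuterB (List.replicate (k + 1) true) [] = [k + 1] := by
  simp only [List.replicate_succ, pvOuterB, if_pos]
  rw [show (List.replicate k true : List Bool) = List.replicate k true ++ [] by simp,
    pvInnerB_replicate k [] 1]
  simp [pvInnerB, pvOuterB, Nat.add_comm]

-- main invariant: A's loop with pending counter c behaves like B on (replicate c true ++ xs)
theorem pvMain : ∀ (xs : List Bool) (count : Int) (c : Nat),
    (let st := pvLoopA xs (count, (c : Int));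
      if st.2 ≥ 6 then st.1 + st.2 else st.1)
      = count + pvSumBig (pvOuterB (List.replicate c true ++ xs) []) := by
  intro xs
  induction xs with
  | nil =>
    intro count c
    simp only [pvLoopA, List.append_nil]
    cases c with
    | zero => simp [pvOuterB, pvSumBig]
    | succ k =>
      rw [pvOuterB_true_block_nil k, pvSumBig_cons]
      rw [pvSumBig_nil, add_zero]
      by_cases h : k + 1 ≥ 6
      · rw [if_pos (by exact_mod_cast h), if_pos h]
      · rw [if_neg (by exact_mod_cast h), if_neg h]; ring
  | cons v rest ih =>
    intro count c
    cases v with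
    | true =>
      simp only [pvLoopA, if_pos]
      have h1 : ((c : Int) + 1) = ((c + 1 : Nat) : Int) := by push_cast; ring
      have h2 : List.replicate c true ++ true :: rest = List.replicate (c + 1) true ++ rest := by
        simp [List.replicate_succ']
      rw [h1, ih count (c + 1), ← h2]
    | false =>
      simp only [pvLoopA, Bool.false_eq_true, if_false]
      rw [show (0 : Int) = ((0 : Nat) : Int) by rfl, ih _ 0]
      simp only [List.replicate_zero, List.nil_append]
      cases c with
      | zero =>
        simp only [List.replicate_zero, List.nil_append, Nat.cast_zero]
        rw [if_neg (by omega : ¬ (0:Int) ≥ 6)]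
        simp [pvOuterB]
      | succ k =>
        rw [pvOuterB_true_block k rest, pvSumBig_cons]
        by_cases h : k + 1 ≥ 6
        · rw [if_pos (by exact_mod_cast h), if_pos h]; push_cast; ring
        · rw [if_neg (by exact_mod_cast h), if_neg h]; ring

-- ===== VERDICT (by name: the statement is the Claim_ definition above) =====
theorem compute_spell_index_spec : Claim_equal_compute_spell_index := by
  intro condition _
  show compute_spell_index condition = compute_spell_index_alt condition
  have := pvMain condition 0 0
  simpa [compute_spell_index, compute_spell_index_alt, pvSumBig] using this
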